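-- pv_equiv track=rewrite | github.com/ZEROICEWANG/ML | 第四章/CART.py | train_encoder
-- ===== SOURCE A (Python) =====
-- def train_encoder(data):
--     classes = 0
--     collected_class = []
--     dic = {}
--     for i in data:
--         if i in collected_class:
--             continue
--         else:
--             dic[i] = classes
--             classes += 1
--             collected_class.append(i)
--     for i in range(len(data)):
--         data[i] = dic[data[i]]
--     return data, dic
-- ===== SOURCE B (Python) =====
-- def train_encoder(data):
--     dic = {}
--     for i in range(len(data)):
--         data[i] = dic.setdefault(data[i], len(dic))
--     return data, dic
-- ===== Notes on version B (the rewrite author's own statement) =====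
-- stated objective: faster
-- what changed: B replaces A's two traversals (a table-building loop with an O(n) list membership test per element, then a remapping loop) with a single pass that assigns each element its label via dict.setdefault(v, len(dic)).
import Mathlib
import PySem

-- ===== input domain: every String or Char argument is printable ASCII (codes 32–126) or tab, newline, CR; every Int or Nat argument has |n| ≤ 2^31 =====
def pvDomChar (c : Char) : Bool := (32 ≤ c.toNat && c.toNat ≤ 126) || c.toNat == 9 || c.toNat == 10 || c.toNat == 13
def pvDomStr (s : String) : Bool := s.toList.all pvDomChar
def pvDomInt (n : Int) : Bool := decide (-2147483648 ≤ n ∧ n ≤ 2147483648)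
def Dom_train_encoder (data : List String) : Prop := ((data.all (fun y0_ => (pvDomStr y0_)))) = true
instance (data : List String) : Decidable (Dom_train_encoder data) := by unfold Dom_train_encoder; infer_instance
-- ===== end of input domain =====

-- B replaces A's two traversals (build table with list-membership scan, then remap) with one
-- setdefault pass; both mutate `data` in place in Python, the equivalence is about the return value.


-- ===== PORT A =====
-- first loop: state (classes, collected_class, dic); second loop rewrites data[i] := dic[data[i]]
-- (every element is a key of dic by then, so the lookup is ported with getD)
def train_encoder (data : List String) : List Int × (List (String × Int)) :=
  let st := data.foldl
    (fun (st : Int × List String × PySem.Dict String Int) i =>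
      if i ∈ st.2.1 then st
      else (st.1 + 1, st.2.1 ++ [i], st.2.2.insert i st.1))
    (0, [], PySem.Dict.empty)
  let dic := st.2.2
  (data.map (fun s => dic.getD s 0), dic.items)

-- ===== PORT B =====
-- single pass: data[i] = dic.setdefault(data[i], len(dic))
def train_encoder_alt (data : List String) : List Int × (List (String × Int)) :=
  let st := data.foldl
    (fun (st : List Int × PySem.Dict String Int) v =>
      let d := st.2.setdefault v (st.2.size : Int)
      (st.1 ++ [d.getD v 0], d))
    ([], PySem.Dict.empty)
  (st.1, st.2.items)

-- ===== PRECONDITION & SPEC =====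
def Spec_train_encoder (data : List String) (out : List Int × (List (String × Int))) : Prop := out = train_encoder_alt data
instance (data : List String) (out : List Int × (List (String × Int))) : Decidable (Spec_train_encoder data out) := by unfold Spec_train_encoder; infer_instance

-- ===== CLAIM (what is proved, stated in full; the proofs are below) =====
def Claim_equal_train_encoder : Prop := ∀ (data : List String), Dom_train_encoder data → Spec_train_encoder data (train_encoder data)

-- ===== LEMMAS AND PROOFS =====

-- the common dict-building fold
def teDic (l : List String) (d : PySem.Dict String Int) : PySem.Dict String Int :=
  l.foldl (fun d v => d.setdefault v (d.size : Int)) d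

-- lookups of keys already present are unchanged by the rest of the fold
theorem teDic_get?_mono (l : List String) (d : PySem.Dict String Int) (v : String)
    (h : d.contains v = true) : (teDic l d).get? v = d.get? v := by
  induction l generalizing d with
  | nil => rfl
  | cons x t ih =>
    simp only [teDic, List.foldl] at *
    by_cases hx : d.contains x = true
    · rw [PySem.Dict.setdefault_of_contains d _ hx]; exact ih d h
    · rw [PySem.Dict.setdefault_of_not_contains d _ (by simpa using hx)]
      have hne : v ≠ x := by rintro rfl; exact hx h
      rw [ih _ (by rw [PySem.Dict.contains_insert]; simp [h]),
        PySem.Dict.get?_insert_of_ne d _ hne]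

-- A's first loop, run from a coherent state, is the setdefault fold
theorem teA_fold (l : List String) (d : PySem.Dict String Int) :
    l.foldl (fun (st : Int × List String × PySem.Dict String Int) i =>
        if i ∈ st.2.1 then st
        else (st.1 + 1, st.2.1 ++ [i], st.2.2.insert i st.1))
      ((d.size : Int), d.keys, d)
      = (((teDic l d).size : Int), (teDic l d).keys, teDic l d) := by
  induction l generalizing d with
  | nil => rfl
  | cons x t ih =>
    simp only [List.foldl, teDic] at *
    by_cases hx : x ∈ d.keys
    · have hc : d.contains x = true := (PySem.Dict.contains_iff_mem_keys d x).mpr hx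
      rw [if_pos hx, PySem.Dict.setdefault_of_contains d _ hc]
      exact ih d
    · have hc : d.contains x = false := by
        cases h : d.contains x
        · rfl
        · exact absurd ((PySem.Dict.contains_iff_mem_keys d x).mp h) hx
      rw [if_neg hx, PySem.Dict.setdefault_of_not_contains d _ hc]
      have hk : (d.insert x (d.size : Int)).keys = d.keys ++ [x] :=
        PySem.Dict.keys_insert_of_not_contains d _ hc
      have hs : (d.insert x (d.size : Int)).size = d.size + 1 := by
        simp [PySem.Dict.size, PySem.Dict.items_insert_of_not_contains d _ hc]
      have := ih (d.insert x (d.size : Int))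
      rw [hk, hs] at this
      simpa using this

-- B's fold labels with the final dict
theorem teB_fold (l : List String) (d : PySem.Dict String Int) (acc : List Int) :
    l.foldl (fun (st : List Int × PySem.Dict String Int) v =>
        let d := st.2.setdefault v (st.2.size : Int)
        (st.1 ++ [d.getD v 0], d)) (acc, d)
      = (acc ++ l.map (fun s => (teDic l d).getD s 0), teDic l d) := by
  induction l generalizing d acc with
  | nil => simp [teDic]
  | cons x t ih =>
    simp only [List.foldl, teDic, List.map] at *
    set d1 := d.setdefault x (d.size : Int) with hd1
    have hc1 : d1.contains x = true := by
      rw [PySem.Dict.contains_eq_isSome_get?, hd1, PySem.Dict.get?_setdefault_self]; rfl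
    have hfix : (teDic t d1).getD x 0 = d1.getD x 0 := by
      rw [PySem.Dict.getD_eq_get?_getD, teDic_get?_mono t d1 x hc1,
        ← PySem.Dict.getD_eq_get?_getD]
    rw [ih d1 (acc ++ [d1.getD x 0])]
    simp only [teDic] at hfix
    rw [hfix]
    simp

-- ===== VERDICT (by name: the statement is the Claim_ definition above) =====
theorem train_encoder_spec : Claim_equal_train_encoder := by
  intro data _
  unfold Spec_train_encoder train_encoder train_encoder_alt
  have hA := teA_fold data PySem.Dict.empty
  have hB := teB_fold data PySem.Dict.empty []
  simp only [PySem.Dict.size_empty, PySem.Dict.keys_empty, Nat.cast_zero] at hA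
  rw [hA, hB]
  simp
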